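-- pv_equiv track=rewrite | github.com/kermitt2/delft | delft/utilities/convert_model.py | build_suffix_index
-- ===== SOURCE A (Python) =====
-- def build_suffix_index(old_index: dict) -> dict[str, list[str]]:
--     """Build a reverse lookup: for every old key, register all its suffixes.
--
--     For ``crf/chain_kernel:0`` this registers ``crf/chain_kernel:0`` and
--     ``chain_kernel:0``.  For ``model/tf_bert_model/bert/.../weight:0`` it
--     registers every sub-path from the full path down to ``weight:0``.
--
--     Returns ``{suffix: [list of full old keys that end with it]}``.
--     """
--     idx: dict[str, list[str]] = {}
--     for full_key in old_index:
--         parts = full_key.split("/")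
--         for i in range(len(parts)):
--             suffix = "/".join(parts[i:])
--             idx.setdefault(suffix, []).append(full_key)
--     return idx
-- ===== SOURCE B (Python) =====
-- def build_suffix_index(old_index):
--     """Staged: build each key's suffixes right-to-left by extending an accumulator
--     (no split-tail re-joins), emit one flat (suffix, key) stream, then group it."""
--     def suffixes(key):
--         acc = None
--         out = []
--         for part in reversed(key.split("/")):
--             acc = part if acc is None else part + "/" + acc
--             out.append(acc)
--         out.reverse()
--         return out
--
--     pairs = [(s, k) for k in old_index for s in suffixes(k)]
--     idx = {}
--     for s, k in pairs:
--         idx.setdefault(s, []).append(k)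
--     return idx
-- ===== Notes on version B (the rewrite author's own statement) =====
-- stated objective: alternative
-- what changed: B is staged: each key's suffixes are built right-to-left by extending one accumulator string (no split-tail re-joins), all (suffix, key) pairs are emitted as one flat stream, and a separate grouping pass fills the dict; A interleaves split/join-per-tail with dict updates in nested loops.
import Mathlib
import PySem

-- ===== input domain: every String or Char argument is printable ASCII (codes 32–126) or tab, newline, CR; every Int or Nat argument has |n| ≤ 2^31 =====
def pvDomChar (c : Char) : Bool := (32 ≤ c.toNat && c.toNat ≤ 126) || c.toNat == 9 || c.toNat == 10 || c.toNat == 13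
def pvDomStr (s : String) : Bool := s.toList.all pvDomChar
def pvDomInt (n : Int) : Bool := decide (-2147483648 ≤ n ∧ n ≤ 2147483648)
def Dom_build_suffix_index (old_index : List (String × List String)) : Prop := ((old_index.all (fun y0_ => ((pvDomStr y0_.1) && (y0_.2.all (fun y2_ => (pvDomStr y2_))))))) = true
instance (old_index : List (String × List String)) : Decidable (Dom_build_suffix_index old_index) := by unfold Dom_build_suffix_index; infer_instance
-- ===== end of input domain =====

-- B builds each key's suffixes right-to-left with an accumulator and groups a flat
-- (suffix, key) pair stream in a second pass, instead of A's nested split/join-per-tail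
-- loop updating the dict in place; same output and insertion order (alternative decomposition).


-- ===== PORT A =====
-- 'idx.setdefault(suffix, []).append(full_key)' is ported as Dict.modify suffix [] (· ++ [full_key]),
-- which is exactly d[suffix] = d.get(suffix, []) + [full_key] (same key position / append-at-end semantics).
def build_suffix_index (old_index : List (String × List String)) : List (String × List String) :=
  (old_index.foldl (fun idx p =>
      let full_key := p.1
      let parts := (PySem.Str.split? full_key "/").getD []
      (PySem.List.pyRange 0 parts.length 1).foldl (fun idx i =>
        let suffix := PySem.Str.join "/" (PySem.List.slice parts (some i) none)
        idx.modify suffix [] (fun l => l ++ [full_key])) idx)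
    PySem.Dict.empty).items

-- ===== PORT B =====
-- Source B's suffixes(key): fold over reversed(key.split("/")) carrying (acc, out);
-- 'part + "/" + acc' is ported as exact string concatenation on the char lists.
def pySuffixesB (key : String) : List String :=
  let parts := (PySem.Str.split? key "/").getD []
  ((parts.reverse.foldl (fun (st : Option String × List String) part =>
      let acc := match st.1 with
        | none => part
        | some a => String.ofList (part.toList ++ '/' :: a.toList)
      (some acc, st.2 ++ [acc])) (none, [])).2).reverse

def build_suffix_index_alt (old_index : List (String × List String)) : List (String × List String) :=
  let pairs := old_index.flatMap (fun p => (pySuffixesB p.1).map (fun s => (s, p.1)))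
  (pairs.foldl (fun idx sk => idx.modify sk.1 [] (fun l => l ++ [sk.2])) PySem.Dict.empty).items

-- ===== PRECONDITION & SPEC =====
def Spec_build_suffix_index (old_index : List (String × List String)) (out : List (String × List String)) : Prop := out = build_suffix_index_alt old_index
instance (old_index : List (String × List String)) (out : List (String × List String)) : Decidable (Spec_build_suffix_index old_index out) := by unfold Spec_build_suffix_index; infer_instance

-- ===== CLAIM (what is proved, stated in full; the proofs are below) =====
def Claim_equal_build_suffix_index : Prop := ∀ (old_index : List (String × List String)), Dom_build_suffix_index old_index → Spec_build_suffix_index old_index (build_suffix_index old_index)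

-- ===== LEMMAS AND PROOFS =====

-- Reference single-char split, structurally recursive.
def mySplit (cs : List Char) (sep : Char) : List (List Char) :=
  match cs with
  | [] => [[]]
  | c :: rest => if c = sep then [] :: mySplit rest sep
                 else (mySplit rest sep).modifyHead (c :: ·)

theorem go_spec (sep : Char) (fuel : Nat) :
    ∀ (l cur : List Char) (accs : List (List Char)), l.length ≤ fuel →
      PySem.Chars.splitOn.go [sep] fuel l cur accs =
        accs.reverse ++ (mySplit l sep).modifyHead (cur.reverse ++ ·) := by
  induction fuel with
  | zero =>
    intro l cur accs h
    have : l = [] := by cases l <;> simp_all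
    subst this
    simp [PySem.Chars.splitOn.go, mySplit, List.modifyHead]
  | succ fuel ih =>
    intro l cur accs h
    cases l with
    | nil => simp [PySem.Chars.splitOn.go, mySplit, List.modifyHead]
    | cons c rest =>
      simp only [PySem.Chars.splitOn.go]
      by_cases hc : c = sep
      · subst hc
        have hp : [c].isPrefixOf (c :: rest) = true := by simp [List.isPrefixOf]
        rw [if_pos hp]
        simp only [List.length_cons] at h
        rw [ih _ _ _ (by simpa using h)]
        simp only [mySplit]
        cases hms : mySplit rest c with
        | nil => simp [hms, List.modifyHead]
        | cons p t => simp [hms, List.modifyHead]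
      · have hp : [sep].isPrefixOf (c :: rest) = false := by
          simp [List.isPrefixOf]; exact fun hh => absurd hh.symm hc
        rw [if_neg (by simp [hp])]
        simp only [List.length_cons] at h
        rw [ih _ _ _ (by omega)]
        simp only [mySplit, if_neg hc]
        cases hms : mySplit rest sep with
        | nil => simp [List.modifyHead]
        | cons p t => simp [List.modifyHead]

theorem splitOn_eq_mySplit (cs : List Char) (sep : Char) :
    PySem.Chars.splitOn cs [sep] = mySplit cs sep := by
  rw [PySem.Chars.splitOn, go_spec sep (cs.length + 1) cs [] [] (by omega)]
  cases hms : mySplit cs sep with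
  | nil => simp [List.modifyHead]
  | cons p t => simp [List.modifyHead]

theorem mySplit_ne_nil (cs : List Char) (sep : Char) : mySplit cs sep ≠ [] := by
  cases cs with
  | nil => simp [mySplit]
  | cons c rest =>
    simp only [mySplit]
    split_ifs
    · simp
    · cases h : mySplit rest sep with
      | nil => exact absurd h (mySplit_ne_nil rest sep)
      | cons a t => simp

theorem split?_eq (k : String) :
    (PySem.Str.split? k "/").getD [] = (mySplit k.toList '/').map String.ofList := by
  have hsep : ("/" : String).toList = ['/'] := rfl
  simp [PySem.Str.split?, PySem.Chars.split?, hsep, splitOn_eq_mySplit, List.isEmpty]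

-- A-side per-key suffix list (on char parts): longest suffix first.
def charSufA : List (List Char) → List (List Char)
  | [] => []
  | p :: rest => PySem.Chars.join ['/'] (p :: rest) :: charSufA rest

theorem rangeA (P : List (List Char)) :
    (List.range P.length).map (fun j => PySem.Str.join "/" ((P.map String.ofList).drop j))
      = (charSufA P).map String.ofList := by
  induction P with
  | nil => simp [charSufA]
  | cons p t ih =>
    have hsep : ("/" : String).toList = ['/'] := rfl
    simp only [List.length_cons, List.range_succ_eq_map, List.map_cons, List.map_map, charSufA]
    refine List.cons_eq_cons.mpr ⟨?_, ?_⟩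
    · simp [PySem.Str.join, hsep, List.map_map, Function.comp_def]
    · rw [← ih]
      apply List.map_congr_left
      intro j hj
      simp

-- A's inner loop enumerates exactly (charSufA parts).map ofList.
theorem suffix_lists_eqA (k : String) :
    (PySem.List.pyRange 0 ((PySem.Str.split? k "/").getD []).length 1).map
      (fun i => PySem.Str.join "/" (PySem.List.slice ((PySem.Str.split? k "/").getD []) (some i) none))
      = (charSufA (mySplit k.toList '/')).map String.ofList := by
  rw [split?_eq]
  rw [PySem.List.pyRange_one]
  have hlen2 : ((((mySplit k.toList '/').map String.ofList).length : Int) - 0).toNat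
      = (mySplit k.toList '/').length := by simp
  rw [hlen2, List.map_map]
  have hfun : ((fun i => PySem.Str.join "/" (PySem.List.slice ((mySplit k.toList '/').map String.ofList) (some i) none)) ∘ (fun j : Nat => (0 : Int) + j))
      = fun j : Nat => PySem.Str.join "/" (((mySplit k.toList '/').map String.ofList).drop j) := by
    funext j
    simp [PySem.List.slice_from_natCast]
  rw [hfun, rangeA]

-- B's right-to-left fold, characterised on char parts.
theorem foldB_spec (P : List (List Char)) (hP : P ≠ []) :
    (P.reverse.foldl (fun (st : Option String × List String) p =>
        let acc := match st.1 with
          | none => String.ofList p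
          | some a => String.ofList (p ++ '/' :: a.toList)
        (some acc, st.2 ++ [acc])) (none, []))
      = (some (String.ofList (PySem.Chars.join ['/'] P)), ((charSufA P).map String.ofList).reverse) := by
  induction P with
  | nil => exact absurd rfl hP
  | cons p t ih =>
    cases t with
    | nil => simp [charSufA, PySem.Chars.join_singleton]
    | cons q u =>
      rw [List.reverse_cons, List.foldl_append, ih (by simp)]
      simp only [List.foldl_cons, List.foldl_nil, charSufA]
      rw [PySem.Chars.join_cons_cons]
      simp [List.reverse_cons]

theorem pySuffixesB_eq (k : String) :
    pySuffixesB k = (charSufA (mySplit k.toList '/')).map String.ofList := by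
  simp only [pySuffixesB, split?_eq]
  have hrev : ((mySplit k.toList '/').map String.ofList).reverse
      = ((mySplit k.toList '/').reverse).map String.ofList := by
    simp [List.map_reverse]
  rw [hrev, List.foldl_map]
  have hfun : (fun (st : Option String × List String) (p : List Char) =>
      let acc := match st.1 with
        | none => String.ofList p
        | some a => String.ofList ((String.ofList p).toList ++ '/' :: a.toList)
      (some acc, st.2 ++ [acc]))
      = (fun (st : Option String × List String) (p : List Char) =>
      let acc := match st.1 with
        | none => String.ofList p
        | some a => String.ofList (p ++ '/' :: a.toList)
      (some acc, st.2 ++ [acc])) := by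
    funext st p
    cases st.1 <;> simp
  rw [hfun, foldB_spec _ (mySplit_ne_nil k.toList '/')]
  simp

-- foldl over a flatMap = nested foldl (B's two staged passes vs A's nested loops).
theorem foldl_flatMap {α β γ : Type} (g : α → List β) (f : γ → β → γ) (l : List α) (init : γ) :
    (l.flatMap g).foldl f init = l.foldl (fun acc x => (g x).foldl f acc) init := by
  induction l generalizing init with
  | nil => rfl
  | cons x t ih => simp [List.flatMap_cons, List.foldl_append, ih]

-- ===== VERDICT (by name: the statement is the Claim_ definition above) =====
theorem build_suffix_index_spec : Claim_equal_build_suffix_index := by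
  intro old_index _
  show build_suffix_index old_index = build_suffix_index_alt old_index
  simp only [build_suffix_index, build_suffix_index_alt]
  rw [foldl_flatMap]
  congr 2
  funext idx p
  show (PySem.List.pyRange 0 ((PySem.Str.split? p.1 "/").getD []).length 1).foldl
      (fun idx i => idx.modify (PySem.Str.join "/" (PySem.List.slice ((PySem.Str.split? p.1 "/").getD []) (some i) none)) [] (fun l => l ++ [p.1])) idx
    = ((pySuffixesB p.1).map (fun s => (s, p.1))).foldl
        (fun idx sk => idx.modify sk.1 [] (fun l => l ++ [sk.2])) idx
  rw [List.foldl_map]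
  have h1 := (List.foldl_map
      (f := fun i => PySem.Str.join "/" (PySem.List.slice ((PySem.Str.split? p.1 "/").getD []) (some i) none))
      (g := fun (d : PySem.Dict String (List String)) s => d.modify s [] (fun l => l ++ [p.1]))
      (l := PySem.List.pyRange 0 ((PySem.Str.split? p.1 "/").getD []).length 1) (init := idx)).symm
  rw [suffix_lists_eqA, ← pySuffixesB_eq] at h1
  exact h1
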